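-- pv_equiv track=rewrite | github.com/devpi/devpi | web/devpi_web/views.py | get_toxresults_state
-- ===== SOURCE A (Python) =====
-- def get_toxresults_state(toxresults):
--     if not toxresults:
--         return
--     toxstates = set(x['status'] for x in toxresults)
--     if 'failed' in toxstates:
--         return 'failed'
--     if toxstates == set(['passed']):
--         return 'passed'
--     return 'unknown'
-- ===== SOURCE B (Python) =====
-- def get_toxresults_state(toxresults):
--     if not toxresults:
--         return None
--     any_failed = False
--     all_passed = True
--     for x in toxresults:
--         status = x['status']
--         if status == 'failed':
--             any_failed = True
--         if status != 'passed':
--             all_passed = False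
--     if any_failed:
--         return 'failed'
--     if all_passed:
--         return 'passed'
--     return 'unknown'
-- ===== Notes on version B (the rewrite author's own statement) =====
-- stated objective: simpler
-- what changed: Replaces the intermediate set of statuses and two set queries by a single pass over toxresults maintaining two boolean accumulators (any_failed / all_passed), classifying at the end.
import Mathlib
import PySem

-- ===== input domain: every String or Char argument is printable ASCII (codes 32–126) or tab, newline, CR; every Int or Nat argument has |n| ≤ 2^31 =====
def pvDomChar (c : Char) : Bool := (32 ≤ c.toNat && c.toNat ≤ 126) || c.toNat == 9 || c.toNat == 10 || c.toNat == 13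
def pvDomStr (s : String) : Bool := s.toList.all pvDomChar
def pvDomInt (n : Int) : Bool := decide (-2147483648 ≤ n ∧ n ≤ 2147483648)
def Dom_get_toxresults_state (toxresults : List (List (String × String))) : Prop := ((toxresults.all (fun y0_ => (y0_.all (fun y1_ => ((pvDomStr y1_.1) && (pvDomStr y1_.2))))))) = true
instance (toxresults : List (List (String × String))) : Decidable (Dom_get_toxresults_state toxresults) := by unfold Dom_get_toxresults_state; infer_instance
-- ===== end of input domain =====

-- B replaces A's intermediate set of statuses and two set queries by a single pass
-- with two boolean accumulators (simpler decomposition, same O(n) cost).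


-- ===== PORT A =====
-- x['status'] : first-match lookup; under Pre_ the key is present, so getD's default is never used
def pvStatusOf (d : List (String × String)) : String :=
  ((PySem.Dict.mk d).get? "status").getD ""

def get_toxresults_state (toxresults : List (List (String × String))) : Option String :=
  if toxresults = [] then none
  else
    let toxstates : PySem.Set String := PySem.Set.ofList (toxresults.map pvStatusOf)
    if PySem.Set.contains toxstates "failed" then some "failed"
    else if PySem.Set.equal toxstates (PySem.Set.ofList ["passed"]) then some "passed"
    else some "unknown"

-- ===== PORT B =====
def get_toxresults_state_alt (toxresults : List (List (String × String))) : Option String :=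
  if toxresults = [] then none
  else
    let p := toxresults.foldl
      (fun (p : Bool × Bool) x =>
        let status := pvStatusOf x
        (if status == "failed" then true else p.1,
         if status != "passed" then false else p.2))
      (false, true)
    if p.1 then some "failed"
    else if p.2 then some "passed"
    else some "unknown"

-- ===== PRECONDITION & SPEC =====
-- Pre_ excludes inputs where some entry lacks a 'status' key: there A raises KeyError.
def Pre_get_toxresults_state (toxresults : List (List (String × String))) : Prop :=
  ∀ d ∈ toxresults, "status" ∈ d.map Prod.fst
instance (toxresults : List (List (String × String))) : Decidable (Pre_get_toxresults_state toxresults) := by unfold Pre_get_toxresults_state; infer_instance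

def pvWitness_get_toxresults_state : (List (List (String × String))) := [[("status", "passed")], [("status", "unknown")]]

def Spec_get_toxresults_state (toxresults : List (List (String × String))) (out : Option String) : Prop := out = get_toxresults_state_alt toxresults
instance (toxresults : List (List (String × String))) (out : Option String) : Decidable (Spec_get_toxresults_state toxresults out) := by unfold Spec_get_toxresults_state; infer_instance

-- ===== CLAIM (what is proved, stated in full; the proofs are below) =====
def Claim_equal_get_toxresults_state : Prop := ∀ (toxresults : List (List (String × String))), Dom_get_toxresults_state toxresults → Pre_get_toxresults_state toxresults → Spec_get_toxresults_state toxresults (get_toxresults_state toxresults)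

-- ===== LEMMAS AND PROOFS =====

-- B's fold computed in closed form: (any status == failed, all statuses == passed)
theorem alt_fold_eval (tx : List (List (String × String))) :
    tx.foldl
      (fun (p : Bool × Bool) x =>
        let status := pvStatusOf x
        (if status == "failed" then true else p.1,
         if status != "passed" then false else p.2))
      (false, true)
    = (tx.any (fun x => pvStatusOf x == "failed"),
       tx.all (fun x => pvStatusOf x == "passed")) := by
  rw [PySem.List.foldl_prod_mk
        (f := fun acc x => if pvStatusOf x == "failed" then true else acc)
        (g := fun acc x => if pvStatusOf x != "passed" then false else acc)]
  rw [PySem.List.foldl_if_true_eq, PySem.List.foldl_if_false_eq]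
  simp [List.all_eq_not_any_not, bne]

theorem contains_ofList_statuses (tx : List (List (String × String))) :
    PySem.Set.contains (PySem.Set.ofList (tx.map pvStatusOf)) "failed"
      = tx.any (fun x => pvStatusOf x == "failed") := by
  simp only [PySem.Set.contains]
  rw [Bool.eq_iff_iff]
  simp [PySem.Set.mem_ofList, List.any_eq_true]

theorem equal_ofList_passed (tx : List (List (String × String))) (h : tx ≠ []) :
    PySem.Set.equal (PySem.Set.ofList (tx.map pvStatusOf)) (PySem.Set.ofList ["passed"])
      = tx.all (fun x => pvStatusOf x == "passed") := by
  simp only [PySem.Set.equal]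
  rw [Bool.eq_iff_iff]
  rw [Bool.and_eq_true, PySem.Set.issubset_iff, PySem.Set.issubset_iff]
  simp only [PySem.Set.mem_ofList, List.mem_map, List.all_eq_true, List.mem_singleton]
  constructor
  · rintro ⟨h1, _⟩ x hx
    have := h1 (pvStatusOf x) ⟨x, hx, rfl⟩
    simp [this]
  · intro hall
    refine ⟨by rintro y ⟨x, hx, rfl⟩; simpa using hall x hx, ?_⟩
    intro y hy
    obtain ⟨x, hx⟩ := List.exists_mem_of_ne_nil tx h
    have hx' : pvStatusOf x = "passed" := by simpa using hall x hx
    exact ⟨x, hx, by simp_all⟩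

-- ===== VERDICT (by name: the statement is the Claim_ definition above) =====
theorem get_toxresults_state_spec : Claim_equal_get_toxresults_state := by
  intro tx _ _
  unfold Spec_get_toxresults_state get_toxresults_state get_toxresults_state_alt
  by_cases h : tx = []
  · simp [h]
  · simp only [h, if_false]
    rw [alt_fold_eval, contains_ofList_statuses, equal_ofList_passed tx h]
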